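-- pv_equiv track=rewrite | github.com/Sheldon-92/personalmanager | src/pm/integrations/google_auth.py | _validate_credentials_format
-- ===== SOURCE A (Python) =====
-- from typing import Optional, Dict, Any, Tuple
--
-- def _validate_credentials_format(credentials: Dict[str, Any]) -> bool:
--     """验证凭证文件格式是否正确
--
--     Args:
--         credentials: 凭证字典
--
--     Returns:
--         是否格式正确
--     """
--
--     # 检查是否包含必需的字段
--     required_fields = ['client_id', 'client_secret']
--
--     # 支持两种格式：
--     # 1. 直接格式: {"client_id": "...", "client_secret": "..."}
--     # 2. Google格式: {"web": {"client_id": "...", "client_secret": "..."}}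
--
--     # 检查直接格式
--     if all(field in credentials for field in required_fields):
--         return True
--
--     # 检查Google标准格式
--     if 'web' in credentials:
--         web_config = credentials['web']
--         if all(field in web_config for field in required_fields):
--             return True
--
--     # 检查installed app格式（桌面应用）
--     if 'installed' in credentials:
--         installed_config = credentials['installed']
--         if all(field in installed_config for field in required_fields):
--             return True
--
--     return False
-- ===== SOURCE B (Python) =====
-- def _validate_credentials_format(credentials):
--     # Single pass over the items: flags for the two top-level fields,
--     # and one flag for any nested web/installed config that is complete.
--     has_id = False
--     has_secret = False
--     nested_ok = False
--     for key, value in credentials.items():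
--         if key == 'client_id':
--             has_id = True
--         elif key == 'client_secret':
--             has_secret = True
--         elif key in ('web', 'installed'):
--             nested_ok = nested_ok or ('client_id' in value and 'client_secret' in value)
--     return (has_id and has_secret) or nested_ok
-- ===== Notes on version B (the rewrite author's own statement) =====
-- stated objective: alternative
-- what changed: Replaces A's staged keyed lookups and three branch-and-return blocks with one single pass over the dict items that accumulates boolean flags (top-level client_id/client_secret seen, any complete web/installed sub-config seen) and combines them at the end.
import Mathlib
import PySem

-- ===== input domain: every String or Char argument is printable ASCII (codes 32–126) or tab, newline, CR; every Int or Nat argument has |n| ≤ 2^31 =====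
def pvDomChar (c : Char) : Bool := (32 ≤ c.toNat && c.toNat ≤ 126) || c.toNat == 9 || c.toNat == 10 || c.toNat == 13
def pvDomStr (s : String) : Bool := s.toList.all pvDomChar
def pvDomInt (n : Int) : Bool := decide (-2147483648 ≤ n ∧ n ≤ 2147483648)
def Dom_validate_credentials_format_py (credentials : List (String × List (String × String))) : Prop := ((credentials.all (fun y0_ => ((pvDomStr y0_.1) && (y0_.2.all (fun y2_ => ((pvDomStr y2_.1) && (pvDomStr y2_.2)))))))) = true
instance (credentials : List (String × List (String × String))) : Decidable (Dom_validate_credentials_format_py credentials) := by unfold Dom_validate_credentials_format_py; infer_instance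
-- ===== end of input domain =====

-- B replaces A's staged keyed lookups with a single pass over the items accumulating boolean flags (objective: alternative decomposition, same cost).

-- ===== PORT A =====
-- 'field in dict' : key membership (first component)
def pvKeyIn {α : Type} (k : String) (l : List (String × α)) : Bool :=
  l.any (fun p => p.1 == k)

-- A, step for step: check direct format, then the 'web' branch, then the 'installed' branch, else False.
def validate_credentials_format_py (credentials : List (String × List (String × String))) : Bool :=
  if (["client_id", "client_secret"].all (fun field => pvKeyIn field credentials)) then
    true
  else
    match credentials.find? (fun p => p.1 == "web") with
    | some webp =>
      if (["client_id", "client_secret"].all (fun field => pvKeyIn field webp.2)) then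
        true
      else
        match credentials.find? (fun p => p.1 == "installed") with
        | some instp =>
          if (["client_id", "client_secret"].all (fun field => pvKeyIn field instp.2)) then true else false
        | none => false
    | none =>
      match credentials.find? (fun p => p.1 == "installed") with
      | some instp =>
        if (["client_id", "client_secret"].all (fun field => pvKeyIn field instp.2)) then true else false
      | none => false

-- ===== PORT B =====
-- B: one fold over the items maintaining (has_id, has_secret, nested_ok), combined at the end.
def pvStep (st : Bool × Bool × Bool) (kv : String × List (String × String)) : Bool × Bool × Bool :=
  if kv.1 == "client_id" then (true, st.2.1, st.2.2)
  else if kv.1 == "client_secret" then (st.1, true, st.2.2)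
  else if kv.1 == "web" || kv.1 == "installed" then
    (st.1, st.2.1, st.2.2 || (pvKeyIn "client_id" kv.2 && pvKeyIn "client_secret" kv.2))
  else st

def validate_credentials_format_py_alt (credentials : List (String × List (String × String))) : Bool :=
  let st := credentials.foldl pvStep (false, false, false)
  (st.1 && st.2.1) || st.2.2

-- ===== PRECONDITION & SPEC =====
-- Pre_ excludes association lists with duplicate top-level keys: those cannot arise from a Python
-- dict, and on them A's first-match 'web'/'installed' lookup and B's single pass may disagree.
def Pre_validate_credentials_format_py (credentials : List (String × List (String × String))) : Prop :=
  (credentials.map Prod.fst).Nodup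
instance (credentials : List (String × List (String × String))) : Decidable (Pre_validate_credentials_format_py credentials) := by unfold Pre_validate_credentials_format_py; infer_instance

def pvWitness_validate_credentials_format_py : (List (String × List (String × String))) :=
  [("web", [("client_id", "a"), ("client_secret", "b")])]

def Spec_validate_credentials_format_py (credentials : List (String × List (String × String))) (out : Bool) : Prop := out = validate_credentials_format_py_alt credentials
instance (credentials : List (String × List (String × String))) (out : Bool) : Decidable (Spec_validate_credentials_format_py credentials out) := by unfold Spec_validate_credentials_format_py; infer_instance

-- ===== CLAIM (what is proved, stated in full; the proofs are below) =====
def Claim_equal_validate_credentials_format_py : Prop := ∀ (credentials : List (String × List (String × String))), Dom_validate_credentials_format_py credentials → Pre_validate_credentials_format_py credentials → Spec_validate_credentials_format_py credentials (validate_credentials_format_py credentials)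

-- ===== LEMMAS AND PROOFS =====

def pvNestedOk (kv : String × List (String × String)) : Bool :=
  (kv.1 == "web" || kv.1 == "installed") && (pvKeyIn "client_id" kv.2 && pvKeyIn "client_secret" kv.2)

-- characterisation of B's fold
theorem fold_char (l : List (String × List (String × String))) (a b c : Bool) :
    l.foldl pvStep (a, b, c)
    = (a || pvKeyIn "client_id" l, b || pvKeyIn "client_secret" l, c || l.any pvNestedOk) := by
  induction l generalizing a b c with
  | nil => simp [pvKeyIn]
  | cons kv t ih =>
    rw [List.foldl_cons]
    by_cases h1 : kv.1 = "client_id"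
    · have b1 : (kv.1 == "client_id") = true := by simp [h1]
      have b2 : (kv.1 == "client_secret") = false := by simp [h1]
      have b3 : (kv.1 == "web") = false := by simp [h1]
      have b4 : (kv.1 == "installed") = false := by simp [h1]
      have hs : pvStep (a, b, c) kv = (true, b, c) := by simp [pvStep, b1]
      rw [hs, ih]
      simp [pvKeyIn, pvNestedOk, b1, b2, b3, b4]
    · by_cases h2 : kv.1 = "client_secret"
      · have b1 : (kv.1 == "client_id") = false := by simp [h1]
        have b2 : (kv.1 == "client_secret") = true := by simp [h2]
        have b3 : (kv.1 == "web") = false := by simp [h2]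
        have b4 : (kv.1 == "installed") = false := by simp [h2]
        have hs : pvStep (a, b, c) kv = (a, true, c) := by simp [pvStep, b1, b2]
        rw [hs, ih]
        simp [pvKeyIn, pvNestedOk, b1, b2, b3, b4]
      · by_cases h3 : kv.1 = "web" ∨ kv.1 = "installed"
        · have b1 : (kv.1 == "client_id") = false := by simp [h1]
          have b2 : (kv.1 == "client_secret") = false := by simp [h2]
          have hs : pvStep (a, b, c) kv
              = (a, b, c || (pvKeyIn "client_id" kv.2 && pvKeyIn "client_secret" kv.2)) := by
            rcases h3 with h3 | h3 <;> simp [pvStep, b1, b2, h3]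
          rw [hs, ih]
          rcases h3 with h3 | h3 <;>
            simp [pvKeyIn, pvNestedOk, b1, b2, h3, Bool.or_assoc]
        · rcases not_or.mp h3 with ⟨h3a, h3b⟩
          have b1 : (kv.1 == "client_id") = false := by simp [h1]
          have b2 : (kv.1 == "client_secret") = false := by simp [h2]
          have b3 : (kv.1 == "web") = false := by simp [h3a]
          have b4 : (kv.1 == "installed") = false := by simp [h3b]
          have hs : pvStep (a, b, c) kv = (a, b, c) := by simp [pvStep, b1, b2, b3, b4]
          rw [hs, ih]
          simp [pvKeyIn, pvNestedOk, b1, b2, b3, b4]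

theorem any_key_none {α : Type} (k : String) (l : List (String × α)) (ok : α → Bool)
    (h : l.find? (fun p => p.1 == k) = none) :
    l.any (fun kv => (kv.1 == k) && ok kv.2) = false := by
  induction l with
  | nil => simp
  | cons kv t ih =>
    rw [List.find?_cons] at h
    cases hb : (kv.1 == k) with
    | true => simp [hb] at h
    | false =>
      simp only [hb] at h
      simp [hb, ih h]

-- under nodup keys, 'any entry with key k satisfying ok' = 'the find?-entry satisfies ok'
theorem any_key_nodup {α : Type} (k : String) (l : List (String × α)) (ok : α → Bool)
    (hnd : (l.map Prod.fst).Nodup) :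
    l.any (fun kv => (kv.1 == k) && ok kv.2)
      = (l.find? (fun p => p.1 == k)).elim false (fun p => ok p.2) := by
  induction l with
  | nil => simp
  | cons kv t ih =>
    simp only [List.map_cons, List.nodup_cons] at hnd
    by_cases hk : kv.1 = k
    · have hnone : t.find? (fun p => p.1 == k) = none := by
        rw [List.find?_eq_none]
        intro p hp
        simp only [beq_iff_eq]
        intro hpk
        exact hnd.1 (hk ▸ hpk ▸ List.mem_map_of_mem hp)
      have hz := any_key_none k t ok hnone
      simp [List.find?_cons, hk, hz]
    · have hb : (kv.1 == k) = false := by simp [hk]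
      simp only [List.any_cons, hb, Bool.false_and, Bool.false_or, List.find?_cons, Bool.false_eq_true, if_neg]
      exact ih hnd.2

theorem any_split (l : List (String × List (String × String))) :
    l.any pvNestedOk
      = (l.any (fun kv => (kv.1 == "web") && (pvKeyIn "client_id" kv.2 && pvKeyIn "client_secret" kv.2))
        || l.any (fun kv => (kv.1 == "installed") && (pvKeyIn "client_id" kv.2 && pvKeyIn "client_secret" kv.2))) := by
  induction l with
  | nil => simp
  | cons kv t ih =>
    rw [List.any_cons, List.any_cons, List.any_cons, ih]
    have hd : pvNestedOk kv
        = (((kv.1 == "web") && (pvKeyIn "client_id" kv.2 && pvKeyIn "client_secret" kv.2))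
          || ((kv.1 == "installed") && (pvKeyIn "client_id" kv.2 && pvKeyIn "client_secret" kv.2))) := by
      simp only [pvNestedOk]
      cases kv.1 == "web" <;> cases kv.1 == "installed" <;> simp
    rw [hd]
    cases (kv.1 == "web") && (pvKeyIn "client_id" kv.2 && pvKeyIn "client_secret" kv.2) <;>
      cases (kv.1 == "installed") && (pvKeyIn "client_id" kv.2 && pvKeyIn "client_secret" kv.2) <;>
        cases t.any (fun kv => (kv.1 == "web") && (pvKeyIn "client_id" kv.2 && pvKeyIn "client_secret" kv.2)) <;>
          cases t.any (fun kv => (kv.1 == "installed") && (pvKeyIn "client_id" kv.2 && pvKeyIn "client_secret" kv.2)) <;>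
            simp

theorem any_key_nodup' (k : String) (l : List (String × List (String × String)))
    (hnd : (l.map Prod.fst).Nodup) :
    l.any (fun kv => (kv.1 == k) && (pvKeyIn "client_id" kv.2 && pvKeyIn "client_secret" kv.2))
      = (l.find? (fun p => p.1 == k)).elim false
          (fun p => pvKeyIn "client_id" p.2 && pvKeyIn "client_secret" p.2) :=
  any_key_nodup k l (fun d => pvKeyIn "client_id" d && pvKeyIn "client_secret" d) hnd

-- ===== VERDICT (by name: the statement is the Claim_ definition above) =====
theorem validate_credentials_format_py_spec : Claim_equal_validate_credentials_format_py := by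
  intro credentials _ hpre
  unfold Spec_validate_credentials_format_py
  unfold validate_credentials_format_py validate_credentials_format_py_alt
  simp only [fold_char, any_split, any_key_nodup' _ _ hpre, List.all_cons, List.all_nil,
    Bool.and_true, Bool.false_or]
  cases hcid : pvKeyIn "client_id" credentials <;>
    cases hcs : pvKeyIn "client_secret" credentials <;>
      cases hw : credentials.find? (fun p => p.1 == "web") <;>
        cases hi : credentials.find? (fun p => p.1 == "installed") <;>
          simp
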